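-- pv_equiv track=rewrite | github.com/TheophileMelquiot/XGBoost_header_detection_package | excel_ai/feature_engineering.py | max_consecutive_empty
-- ===== SOURCE A (Python) =====
-- def max_consecutive_empty(values):
--     max_count = 0
--     current = 0
--     for v in values:
--         if v is None:
--             current += 1
--             max_count = max(max_count, current)
--         else:
--             current = 0
--     return max_count
-- ===== SOURCE B (Python) =====
-- def max_consecutive_empty(values):
--     # Gap formulation: the longest None-run equals the largest gap between
--     # consecutive non-None positions (with sentinels -1 and len(values)).
--     n = len(values)
--     boundaries = [-1] + [i for i, v in enumerate(values) if v is not None] + [n]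
--     return max(b - a - 1 for a, b in zip(boundaries, boundaries[1:]))
-- ===== Notes on version B (the rewrite author's own statement) =====
-- stated objective: alternative
-- what changed: Replaces the running max_count/current accumulator pass by a gap formulation: collect the indices of non-None entries (with sentinels -1 and len(values)) and return the largest gap between consecutive boundaries minus one.
import Mathlib
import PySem

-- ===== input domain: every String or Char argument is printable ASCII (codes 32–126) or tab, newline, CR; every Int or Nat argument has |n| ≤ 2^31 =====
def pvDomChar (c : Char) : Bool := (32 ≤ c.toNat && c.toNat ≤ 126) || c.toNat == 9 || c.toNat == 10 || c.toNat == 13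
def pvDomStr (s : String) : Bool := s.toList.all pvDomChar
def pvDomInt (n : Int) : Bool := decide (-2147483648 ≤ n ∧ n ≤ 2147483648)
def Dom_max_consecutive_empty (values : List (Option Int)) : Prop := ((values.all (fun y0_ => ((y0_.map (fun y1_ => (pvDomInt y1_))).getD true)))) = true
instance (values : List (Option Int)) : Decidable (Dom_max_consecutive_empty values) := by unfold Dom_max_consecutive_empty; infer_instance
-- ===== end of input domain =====

-- B replaces A's running-accumulator pass by a gap formulation: the longest None-run
-- is the largest gap between consecutive non-None positions (with sentinels -1 and n).

-- ===== PORT A =====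
def max_consecutive_empty (values : List (Option Int)) : Int :=
  (values.foldl
    (fun (s : Int × Int) v =>
      if v = none then (max s.1 (s.2 + 1), s.2 + 1) else (s.1, 0))
    ((0 : Int), (0 : Int))).1

-- ===== PORT B =====
def max_consecutive_empty_alt (values : List (Option Int)) : Int :=
  let n : Int := values.length
  let boundaries : List Int :=
    [-1] ++ ((PySem.List.enumerate values 0).filter (fun p => p.2.isSome)).map (fun p => p.1) ++ [n]
  -- boundaries has at least two elements, so the generator below is never empty
  -- and Python's max never raises; .getD 0 is therefore unreachable.
  (PySem.List.max? ((boundaries.zip boundaries.tail).map (fun p => p.2 - p.1 - 1)) (fun x => x)).getD 0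

-- ===== PRECONDITION & SPEC =====
def Spec_max_consecutive_empty (values : List (Option Int)) (out : Int) : Prop := out = max_consecutive_empty_alt values
instance (values : List (Option Int)) (out : Int) : Decidable (Spec_max_consecutive_empty values out) := by unfold Spec_max_consecutive_empty; infer_instance

-- ===== CLAIM (what is proved, stated in full; the proofs are below) =====
def Claim_equal_max_consecutive_empty : Prop := ∀ (values : List (Option Int)), Dom_max_consecutive_empty values → Spec_max_consecutive_empty values (max_consecutive_empty values)

-- ===== LEMMAS AND PROOFS =====

-- Common specification: pvF c l = max over the run structure of l, where the first
-- run is credited c extra (c = length of the None-run immediately preceding l).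
def pvF (c : Int) : List (Option Int) → Int
  | [] => c
  | none :: t => pvF (c + 1) t
  | some _ :: t => max c (pvF 0 t)

theorem pvF_ge (l : List (Option Int)) (c : Int) : c ≤ pvF c l := by
  induction l generalizing c with
  | nil => simp [pvF]
  | cons h t ih =>
    cases h with
    | none => exact le_trans (by omega) (ih (c + 1))
    | some x => simp [pvF]

-- A's fold from state (m, c) with 0 ≤ c ≤ m returns max m (pvF c l).
theorem foldA_eq (l : List (Option Int)) (m c : Int) (hc : 0 ≤ c) (hcm : c ≤ m) :
    (l.foldl
      (fun (s : Int × Int) v =>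
        if v = none then (max s.1 (s.2 + 1), s.2 + 1) else (s.1, 0))
      (m, c)).1 = max m (pvF c l) := by
  induction l generalizing m c with
  | nil => simp [pvF, max_eq_left hcm]
  | cons h t ih =>
    cases h with
    | none =>
      simp only [List.foldl_cons, reduceIte, pvF]
      rw [ih (max m (c + 1)) (c + 1) (by omega) (le_max_right _ _)]
      rw [max_assoc]
      congr 1
      exact max_eq_right (pvF_ge t (c + 1))
    | some x =>
      simp only [List.foldl_cons, pvF]
      rw [if_neg (Option.some_ne_none x), ih m 0 le_rfl (by omega)]
      rw [max_comm c (pvF 0 t), ← max_assoc]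
      exact (max_eq_left (le_trans hcm (le_max_left m (pvF 0 t)))).symm

theorem portA_eq_pvF (values : List (Option Int)) :
    max_consecutive_empty values = pvF 0 values := by
  unfold max_consecutive_empty
  rw [foldA_eq values 0 0 le_rfl le_rfl]
  exact max_eq_right (pvF_ge values 0)

-- B side: positions of the non-None entries of l, offset by o.
def pvPos (o : Int) : List (Option Int) → List Int
  | [] => []
  | none :: t => pvPos (o + 1) t
  | some _ :: t => o :: pvPos (o + 1) t

theorem pos_eq_enumerate (l : List (Option Int)) (o : Int) :
    ((PySem.List.enumerate l o).filter (fun p => p.2.isSome)).map (fun p => p.1) = pvPos o l := by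
  induction l generalizing o with
  | nil => simp [PySem.List.enumerate_nil, pvPos]
  | cons h t ih =>
    cases h with
    | none => simp [PySem.List.enumerate_cons, pvPos, ih]
    | some x => simp [PySem.List.enumerate_cons, pvPos, ih]

-- Consecutive differences (minus 1) of prev :: rest.
def pvDiffs (prev : Int) : List Int → List Int
  | [] => []
  | x :: xs => (x - prev - 1) :: pvDiffs x xs

theorem zip_tail_eq_diffs (rest : List Int) (prev : Int) :
    (((prev :: rest).zip (prev :: rest).tail).map (fun p => p.2 - p.1 - 1)) = pvDiffs prev rest := by
  induction rest generalizing prev with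
  | nil => simp [pvDiffs]
  | cons x xs ih => simpa [pvDiffs] using ih x

theorem pvDiffs_append_ne_nil (xs : List Int) (prev y : Int) :
    pvDiffs prev (xs ++ [y]) ≠ [] := by
  cases xs <;> simp [pvDiffs]

def pvMaxD : List Int → Int
  | [] => 0
  | x :: t => t.foldl max x

theorem foldl_max_comm (ys : List Int) (a b : Int) :
    ys.foldl max (max a b) = max a (ys.foldl max b) := by
  induction ys generalizing b with
  | nil => rfl
  | cons c cs ih => simpa [List.foldl_cons, max_assoc] using ih (max b c)

theorem pvMaxD_cons_of_ne_nil (a : Int) (rest : List Int) (h : rest ≠ []) :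
    pvMaxD (a :: rest) = max a (pvMaxD rest) := by
  cases rest with
  | nil => exact absurd rfl h
  | cons y ys => simpa [pvMaxD] using foldl_max_comm ys a y

-- Key lemma: the max gap over runs of l (seen from offset o, last non-None at prev)
-- equals pvF (o - prev - 1) l.
theorem maxD_diffs_eq_pvF (l : List (Option Int)) (o prev : Int) :
    pvMaxD (pvDiffs prev (pvPos o l ++ [o + l.length])) = pvF (o - prev - 1) l := by
  induction l generalizing o prev with
  | nil => simp [pvPos, pvDiffs, pvMaxD, pvF]
  | cons h t ih =>
    cases h with
    | none =>
      have harith : o + ((none :: t : List (Option Int)).length : Int) = (o + 1) + t.length := by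
        simp; omega
      rw [show pvPos o (none :: t) = pvPos (o + 1) t from rfl, harith, ih (o + 1) prev]
      show pvF ((o + 1) - prev - 1) t = pvF (o - prev - 1) (none :: t)
      rw [show pvF (o - prev - 1) (none :: t) = pvF (o - prev - 1 + 1) t from rfl]
      congr 1; omega
    | some x =>
      have harith : o + ((some x :: t : List (Option Int)).length : Int) = (o + 1) + t.length := by
        simp; omega
      rw [show pvPos o (some x :: t) = o :: pvPos (o + 1) t from rfl, harith, List.cons_append]
      rw [show pvDiffs prev (o :: (pvPos (o + 1) t ++ [(o + 1) + (t.length : Int)]))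
            = (o - prev - 1) :: pvDiffs o (pvPos (o + 1) t ++ [(o + 1) + (t.length : Int)]) from rfl]
      rw [pvMaxD_cons_of_ne_nil _ _ (pvDiffs_append_ne_nil _ _ _)]
      rw [ih (o + 1) o]
      show max (o - prev - 1) (pvF ((o + 1) - o - 1) t) = pvF (o - prev - 1) (some x :: t)
      rw [show (o + 1) - o - 1 = (0 : Int) by omega]
      rfl

theorem portB_eq_pvF (values : List (Option Int)) :
    max_consecutive_empty_alt values = pvF 0 values := by
  unfold max_consecutive_empty_alt
  simp only [pos_eq_enumerate]
  rw [show ([-1] ++ pvPos 0 values ++ [(values.length : Int)])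
        = (-1) :: (pvPos 0 values ++ [(values.length : Int)]) from rfl]
  rw [zip_tail_eq_diffs]
  obtain ⟨g, gt, hg⟩ : ∃ g gt, pvDiffs (-1) (pvPos 0 values ++ [(values.length : Int)]) = g :: gt := by
    cases hh : pvDiffs (-1) (pvPos 0 values ++ [(values.length : Int)]) with
    | nil => exact absurd hh (pvDiffs_append_ne_nil _ _ _)
    | cons g gt => exact ⟨g, gt, rfl⟩
  rw [hg, PySem.List.max?_id_cons, Option.getD_some]
  have := maxD_diffs_eq_pvF values 0 (-1)
  rw [show (0 : Int) + (values.length : Int) = (values.length : Int) by omega, hg] at this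
  simpa [pvMaxD] using this

-- ===== VERDICT (by name: the statement is the Claim_ definition above) =====
theorem max_consecutive_empty_spec : Claim_equal_max_consecutive_empty := by
  intro values _
  unfold Spec_max_consecutive_empty
  rw [portA_eq_pvF, portB_eq_pvF]
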